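-- pv_equiv track=rewrite | github.com/susanvijoymathew/ZeroToMastery-AdventOfCode | Day3/closest_to_central.py | create_line_coordinates
-- ===== SOURCE A (Python) =====
-- def create_line_coordinates(x, y, direction, num_of_steps):
--     """
--     Given the starting x,y point of the line and the direction and number of moves to make for the next coordinate,
--     a list of tuples mapping the line from starting point to the next coordinate is generated. This tuple list is
--     returned to the caller. If the specified direction is incorrect, an empty tuple list is returned.
--
--     :param x: Starting x point for a line.
--     :param y: Starting y point for a line.
--     :param direction: R, L, U, or D to indicate to move to right, left, up, or down.
--     :param num_of_steps: The number of steps to take in the specified direction.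
--     :return:
--     """
--     if direction == "R":
--         # Don't need to include the starting point for a line as it will be contained in the previous graph.
--         # Also, the central point shouldn't be included either.
--         x2 = [n for n in range(x + 1, x + num_of_steps + 1)]
--         y2 = [y] * len(x2)
--     elif direction == "L":
--         x2 = [n for n in range(x - 1, x - num_of_steps - 1, -1)]
--         y2 = [y] * len(x2)
--     elif direction == "U":
--         y2 = [n for n in range(y + 1, y + num_of_steps + 1)]
--         x2 = [x] * len(y2)
--     elif direction == "D":
--         y2 = [n for n in range(y - 1, y - num_of_steps - 1, -1)]
--         x2 = [x] * len(y2)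
--     else:
--         return [()]
--     return list(zip(x2, y2))
-- ===== SOURCE B (Python) =====
-- def create_line_coordinates(x, y, direction, num_of_steps):
--     deltas = {"R": (1, 0), "L": (-1, 0), "U": (0, 1), "D": (0, -1)}
--     if direction not in deltas:
--         return [()]
--     dx, dy = deltas[direction]
--     return [(x + i * dx, y + i * dy) for i in range(1, num_of_steps + 1)]
-- ===== Notes on version B (the rewrite author's own statement) =====
-- stated objective: simpler
-- what changed: Replaces the four parallel-list-plus-zip branches with a single direction->unit-delta dict lookup and one comprehension generating (x+i*dx, y+i*dy).
-- outside the precondition, e.g. on create_line_coordinates(0, 0, 'X', 3): A returns [()], B returns [()]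
import Mathlib
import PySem

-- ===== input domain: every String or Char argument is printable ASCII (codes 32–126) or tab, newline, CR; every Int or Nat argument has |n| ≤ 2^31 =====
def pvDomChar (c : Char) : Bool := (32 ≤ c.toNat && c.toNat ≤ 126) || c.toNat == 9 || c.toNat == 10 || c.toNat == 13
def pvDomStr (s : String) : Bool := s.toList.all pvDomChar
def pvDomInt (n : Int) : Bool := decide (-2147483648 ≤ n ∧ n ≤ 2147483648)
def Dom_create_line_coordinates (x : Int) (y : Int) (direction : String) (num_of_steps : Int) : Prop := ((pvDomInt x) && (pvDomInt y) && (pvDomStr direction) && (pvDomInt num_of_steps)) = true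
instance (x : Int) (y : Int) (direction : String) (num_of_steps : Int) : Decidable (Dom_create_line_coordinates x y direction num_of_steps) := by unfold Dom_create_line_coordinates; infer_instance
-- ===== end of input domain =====

-- B replaces A's four parallel-list-and-zip branches by one delta-dict-driven comprehension (objective: simpler).

-- ===== PORT A =====
def create_line_coordinates (x : Int) (y : Int) (direction : String) (num_of_steps : Int) : List (Int × Int) :=
  if direction = "R" then
    let x2 := PySem.List.pyRange (x + 1) (x + num_of_steps + 1) 1
    let y2 := List.replicate x2.length y
    x2.zip y2
  else if direction = "L" then
    let x2 := PySem.List.pyRange (x - 1) (x - num_of_steps - 1) (-1)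
    let y2 := List.replicate x2.length y
    x2.zip y2
  else if direction = "U" then
    let y2 := PySem.List.pyRange (y + 1) (y + num_of_steps + 1) 1
    let x2 := List.replicate y2.length x
    x2.zip y2
  else if direction = "D" then
    let y2 := PySem.List.pyRange (y - 1) (y - num_of_steps - 1) (-1)
    let x2 := List.replicate y2.length x
    x2.zip y2
  else
    []  -- Python returns [()] here, a value outside List (Int × Int); excluded by Pre_

-- ===== PORT B =====
def clcDeltas : PySem.Dict String (Int × Int) :=
  PySem.Dict.ofList [("R", (1, 0)), ("L", (-1, 0)), ("U", (0, 1)), ("D", (0, -1))]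

def create_line_coordinates_alt (x : Int) (y : Int) (direction : String) (num_of_steps : Int) : List (Int × Int) :=
  match clcDeltas.get? direction with
  | none => []  -- Python B returns [()] here, outside the Lean result type; excluded by Pre_
  | some (dx, dy) => (PySem.List.pyRange 1 (num_of_steps + 1) 1).map (fun i => (x + i * dx, y + i * dy))

-- ===== PRECONDITION & SPEC =====
-- Pre_ excludes unknown directions: there both Pythons return [()] (a list holding an empty
-- tuple), which is not a value of the declared result type List (Int × Int).
def Pre_create_line_coordinates (x : Int) (y : Int) (direction : String) (num_of_steps : Int) : Prop :=
  direction = "R" ∨ direction = "L" ∨ direction = "U" ∨ direction = "D"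
instance (x : Int) (y : Int) (direction : String) (num_of_steps : Int) : Decidable (Pre_create_line_coordinates x y direction num_of_steps) := by unfold Pre_create_line_coordinates; infer_instance

def pvWitness_create_line_coordinates : Int × Int × String × Int := (2, -3, "L", 4)

def Spec_create_line_coordinates (x : Int) (y : Int) (direction : String) (num_of_steps : Int) (out : List (Int × Int)) : Prop := out = create_line_coordinates_alt x y direction num_of_steps
instance (x : Int) (y : Int) (direction : String) (num_of_steps : Int) (out : List (Int × Int)) : Decidable (Spec_create_line_coordinates x y direction num_of_steps out) := by unfold Spec_create_line_coordinates; infer_instance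

-- ===== CLAIM (what is proved, stated in full; the proofs are below) =====
def Claim_equal_create_line_coordinates : Prop := ∀ (x : Int) (y : Int) (direction : String) (num_of_steps : Int), Dom_create_line_coordinates x y direction num_of_steps → Pre_create_line_coordinates x y direction num_of_steps → Spec_create_line_coordinates x y direction num_of_steps (create_line_coordinates x y direction num_of_steps)

-- ===== LEMMAS AND PROOFS =====

theorem clc_get_R : clcDeltas.get? "R" = some (1, 0) := by decide
theorem clc_get_L : clcDeltas.get? "L" = some (-1, 0) := by decide
theorem clc_get_U : clcDeltas.get? "U" = some (0, 1) := by decide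
theorem clc_get_D : clcDeltas.get? "D" = some (0, -1) := by decide

-- zip of a list with a same-length constant list is a map
theorem clc_zipr {α β : Type} (xs : List α) (b : β) :
    xs.zip (List.replicate xs.length b) = xs.map (fun a => (a, b)) := by
  induction xs with
  | nil => rfl
  | cons a t ih => simp [List.replicate_succ, ih]

theorem clc_zipl {α β : Type} (ys : List β) (a : α) :
    (List.replicate ys.length a).zip ys = ys.map (fun b => (a, b)) := by
  induction ys with
  | nil => rfl
  | cons b t ih => simp [List.replicate_succ, ih]

theorem clc_zip_range_right (n : Nat) (f : Nat → Int) (b : Int) :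
    ((List.range n).map f).zip (List.replicate n b) = (List.range n).map (fun k => (f k, b)) := by
  simpa [List.map_map] using clc_zipr ((List.range n).map f) b

theorem clc_zip_range_left (n : Nat) (g : Nat → Int) (a : Int) :
    (List.replicate n a).zip ((List.range n).map g) = (List.range n).map (fun k => (a, g k)) := by
  simpa [List.map_map] using clc_zipl ((List.range n).map g) a

-- ===== VERDICT (by name: the statement is the Claim_ definition above) =====
theorem create_line_coordinates_spec : Claim_equal_create_line_coordinates := by
  intro x y direction num_of_steps _ hpre
  unfold Spec_create_line_coordinates
  rcases hpre with h | h | h | h <;> subst h <;>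
    simp [create_line_coordinates, create_line_coordinates_alt, clc_get_R, clc_get_L,
      clc_get_U, clc_get_D, PySem.List.pyRange_one, PySem.List.pyRange_neg_one,
      clc_zip_range_right, clc_zip_range_left, List.map_map] <;>
    · intro k _
      ring
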